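-- pv_equiv track=rewrite | github.com/TonyPiterc/alpha | codigoalpha.py | compute_XL_corrected
-- ===== SOURCE A (Python) =====
-- def generate_relation_matrix(log):
--     """Generar la matriz de relaciones a partir del log"""
--     # Extrae todos los eventos únicos de las secuencias
--     elements = sorted({event for sequence in log for event in sequence})
--
--     # Inicializa la matriz con todas las relaciones marcadas como '#L' (sin relación)
--     matrix = {a: {b: '#L' for b in elements} for a in elements}
--
--     # Identifica las relaciones de sucesión directa en cada secuencia
--     direct_successions = set()
--     for sequence in log:
--         for i in range(len(sequence) - 1):
--             direct_successions.add((sequence[i], sequence[i + 1]))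
--
--     # Actualiza la matriz según las relaciones encontradas
--     for a in elements:
--         for b in elements:
--             if (a, b) in direct_successions:
--                 if (b, a) in direct_successions:
--                     # Si hay relación en ambos sentidos, es paralelismo (∥L)
--                     matrix[a][b] = '∥L'
--                     matrix[b][a] = '∥L'
--                 else:
--                     # Si solo hay relación en un sentido, es causalidad (→L/←L)
--                     matrix[a][b] = '→L'
--                     matrix[b][a] = '←L'
--     return matrix
--
-- def compute_XL_corrected(log):
--     """Calcular XL - Pares (A, B) sin filtrar"""
--     # Genera la matriz de relaciones base
--     relations_matrix = generate_relation_matrix(log)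
--     elements = sorted({event for sequence in log for event in sequence})
--
--     def check_internal_relations(set_elements):
--         """Verifica que no haya relaciones de paralelismo o causalidad inversa dentro del conjunto"""
--         for i in range(len(set_elements)):
--             for j in range(len(set_elements)):
--                 if i != j and relations_matrix[set_elements[i]][set_elements[j]] != '#L':
--                     return False
--         return True
--
--     def check_set_relations(set_a, set_b):
--         """Verifica que todos los elementos de A estén en relación de causalidad directa con todos los elementos de B"""
--         for a in set_a:
--             for b in set_b:
--                 if relations_matrix[a][b] != '→L':
--                     return False
--         return True
--
--     # Inicializa el conjunto XL
--     XL = set()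
--     n = len(elements)
--
--     # Genera todos los posibles subconjuntos no vacíos para A
--     for i in range(1, 1 << n):
--         set_a = []
--         for j in range(n):
--             if i & (1 << j):
--                 set_a.append(elements[j])
--
--         # Verifica que el conjunto A cumple las condiciones
--         if not check_internal_relations(set_a):
--             continue
--
--         # Genera todos los posibles subconjuntos no vacíos para B
--         for k in range(1, 1 << n):
--             set_b = []
--             for j in range(n):
--                 if k & (1 << j):
--                     set_b.append(elements[j])
--
--             # Verifica que el conjunto B cumple las condiciones
--             if not check_internal_relations(set_b):
--                 continue
--
--             # Verifica la relación causal entre A y B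
--             if check_set_relations(set_a, set_b):
--                 XL.add((frozenset(set_a), frozenset(set_b)))
--
--     return XL
-- ===== SOURCE B (Python) =====
-- def generate_relation_matrix(log):
--     """Generar la matriz de relaciones a partir del log"""
--     elements = sorted({event for sequence in log for event in sequence})
--     matrix = {a: {b: '#L' for b in elements} for a in elements}
--     direct_successions = set()
--     for sequence in log:
--         for i in range(len(sequence) - 1):
--             direct_successions.add((sequence[i], sequence[i + 1]))
--     for a in elements:
--         for b in elements:
--             if (a, b) in direct_successions:
--                 if (b, a) in direct_successions:
--                     matrix[a][b] = '∥L'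
--                     matrix[b][a] = '∥L'
--                 else:
--                     matrix[a][b] = '→L'
--                     matrix[b][a] = '←L'
--     return matrix
--
-- def compute_XL_corrected(log):
--     """XL by growing internally-valid subsets incrementally, then pairing via target sets."""
--     m = generate_relation_matrix(log)
--     elements = sorted({event for sequence in log for event in sequence})
--
--     # Build every internally-valid non-empty subset by incremental doubling with
--     # pruning: processing the (sorted) alphabet left to right, a valid subset
--     # extended with e stays valid iff e is unrelated ('#L') to each member, and
--     # invalid subsets need never be considered at all.
--     valids = []
--     for e in elements:
--         grown = [[e]]
--         for S in valids:
--             if all(m[a][e] == '#L' and m[e][a] == '#L' for a in S):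
--                 grown.append(S + [e])
--         valids += grown
--
--     XL = set()
--     for A in valids:
--         # targets of A: the events every member of A causally precedes
--         T = [b for b in elements if all(m[a][b] == '→L' for a in A)]
--         for B in valids:
--             if all(b in T for b in B):
--                 XL.add((frozenset(A), frozenset(B)))
--     return XL
-- ===== Notes on version B (the rewrite author's own statement) =====
-- stated objective: alternative
-- what changed: B never enumerates bitmasks: it grows the internally-valid subsets incrementally (a valid subset extended by a new event stays valid iff the event is unrelated to each member, so invalid subsets are pruned before they are built), and pairs A with B through A's precomputed causal-target set instead of re-checking the full relation matrix per pair.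
import Mathlib
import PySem

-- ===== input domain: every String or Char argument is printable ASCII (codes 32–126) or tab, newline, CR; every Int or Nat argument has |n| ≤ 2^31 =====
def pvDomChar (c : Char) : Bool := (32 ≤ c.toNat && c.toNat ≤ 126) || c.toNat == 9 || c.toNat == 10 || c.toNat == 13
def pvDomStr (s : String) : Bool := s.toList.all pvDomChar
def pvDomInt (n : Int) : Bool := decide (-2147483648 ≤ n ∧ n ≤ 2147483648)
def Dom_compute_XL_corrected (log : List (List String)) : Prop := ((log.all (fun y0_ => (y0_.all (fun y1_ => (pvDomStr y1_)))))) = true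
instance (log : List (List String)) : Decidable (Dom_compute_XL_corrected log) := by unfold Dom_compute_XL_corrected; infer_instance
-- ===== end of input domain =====

-- B grows the internally-valid subsets incrementally (pruning invalid ones before they are
-- built) and pairs them through each A-set's precomputed causal-target list, instead of A's
-- double loop over all 2^n bitmasks with per-pair matrix re-checks (objective: alternative).


-- ===== PORT A =====
-- sorted({event for sequence in log for event in sequence})
def pvElements (log : List (List String)) : List String :=
  PySem.List.sorted (PySem.Set.ofList (log.flatMap (fun s => s))) (fun x => x) false

-- the direct_successions set built in generate_relation_matrix
def pvDirectSucc (log : List (List String)) : PySem.Set (String × String) :=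
  log.foldl (fun ds seq =>
    (PySem.List.pyRange 0 ((seq.length : Int) - 1) 1).foldl
      (fun ds i => PySem.Set.add ds (PySem.List.pyGetD seq i "", PySem.List.pyGetD seq (i + 1) ""))
      ds)
    PySem.Set.empty

-- matrix[a][b] read / write (a is always a key of the matrix when used, so getD is exact)
def pvRelGet (m : PySem.Dict String (PySem.Dict String String)) (a b : String) : String :=
  (m.getD a PySem.Dict.empty).getD b ""
def pvRelSet (m : PySem.Dict String (PySem.Dict String String)) (a b v : String) :
    PySem.Dict String (PySem.Dict String String) :=
  m.insert a ((m.getD a PySem.Dict.empty).insert b v)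

-- module helper generate_relation_matrix (identical in Source A and Source B)
def generate_relation_matrix (log : List (List String)) : PySem.Dict String (PySem.Dict String String) :=
  let elements := pvElements log
  let ds := pvDirectSucc log
  let m0 := elements.foldl (fun m a =>
    m.insert a (elements.foldl (fun r b => r.insert b "#L") PySem.Dict.empty)) PySem.Dict.empty
  elements.foldl (fun m a =>
    elements.foldl (fun m b =>
      if PySem.Set.contains ds (a, b) then
        if PySem.Set.contains ds (b, a) then
          pvRelSet (pvRelSet m a b "∥L") b a "∥L"
        else
          pvRelSet (pvRelSet m a b "→L") b a "←L"
      else m) m)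
    m0

-- set_a = [elements[j] for j in range(n) if i & (1 << j)]  (A's mask-extraction loop)
def pvMaskSubset (elements : List String) (mask : Int) : List String :=
  (PySem.List.pyRange 0 (elements.length : Int) 1).foldl
    (fun s j => if PySem.Int.band mask ((1 : Int) <<< j.toNat) ≠ 0
                then s ++ [PySem.List.pyGetD elements j ""] else s) []

-- check_internal_relations (early-return double index loop)
def pvCheckInternal (m : PySem.Dict String (PySem.Dict String String)) (s : List String) : Bool :=
  (PySem.List.pyRange 0 (s.length : Int) 1).all (fun i =>
    (PySem.List.pyRange 0 (s.length : Int) 1).all (fun j =>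
      i == j || pvRelGet m (PySem.List.pyGetD s i "") (PySem.List.pyGetD s j "") == "#L"))

-- check_set_relations (early-return double loop)
def pvCheckSet (m : PySem.Dict String (PySem.Dict String String)) (sa sb : List String) : Bool :=
  sa.all (fun a => sb.all (fun b => pvRelGet m a b == "→L"))

-- A: double loop over ALL masks 1 .. 2^n-1, with `continue` on invalid subsets
def compute_XL_corrected (log : List (List String)) : List (List String × List String) :=
  let m := generate_relation_matrix log
  let elements := pvElements log
  let n := elements.length
  (PySem.List.pyRange 1 ((1 : Int) <<< n) 1).foldl
    (fun XL i =>
      let set_a := pvMaskSubset elements i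
      if !(pvCheckInternal m set_a) then XL
      else
        (PySem.List.pyRange 1 ((1 : Int) <<< n) 1).foldl
          (fun XL k =>
            let set_b := pvMaskSubset elements k
            if !(pvCheckInternal m set_b) then XL
            else if pvCheckSet m set_a set_b then
              PySem.Set.add XL (PySem.Set.ofList set_a, PySem.Set.ofList set_b)
            else XL)
          XL)
    PySem.Set.empty

-- ===== PORT B =====
-- all(m[a][e] == '#L' and m[e][a] == '#L' for a in S)
def pvCompat (m : PySem.Dict String (PySem.Dict String String)) (S : List String) (e : String) : Bool :=
  S.all (fun a => pvRelGet m a e == "#L" && pvRelGet m e a == "#L")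

-- the incremental-doubling construction of all internally-valid non-empty subsets
def pvValids (m : PySem.Dict String (PySem.Dict String String)) (els : List String) :
    List (List String) :=
  els.foldl (fun valids e =>
    valids ++ valids.foldl (fun grown S =>
      if pvCompat m S e then grown ++ [S ++ [e]] else grown) [[e]]) []

-- B: pair the valid subsets through each A-set's causal-target list
def compute_XL_corrected_alt (log : List (List String)) : List (List String × List String) :=
  let m := generate_relation_matrix log
  let elements := pvElements log
  let valids := pvValids m elements
  valids.foldl (fun XL sa =>
    let tset := elements.filter (fun b => sa.all (fun a => pvRelGet m a b == "→L"))
    valids.foldl (fun XL sb =>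
      if sb.all (fun b => tset.contains b) then
        PySem.Set.add XL (PySem.Set.ofList sa, PySem.Set.ofList sb)
      else XL) XL)
    PySem.Set.empty

-- ===== PRECONDITION & SPEC =====
def Spec_compute_XL_corrected (log : List (List String)) (out : List (List String × List String)) : Prop := out = compute_XL_corrected_alt log
instance (log : List (List String)) (out : List (List String × List String)) : Decidable (Spec_compute_XL_corrected log out) := by unfold Spec_compute_XL_corrected; infer_instance

-- ===== CLAIM (what is proved, stated in full; the proofs are below) =====
def Claim_equal_compute_XL_corrected : Prop := ∀ (log : List (List String)), Dom_compute_XL_corrected log → Spec_compute_XL_corrected log (compute_XL_corrected log)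

-- ===== LEMMAS AND PROOFS =====

theorem pv_if_bnot {α : Type} (b : Bool) (x y : α) : (if !b then x else y) = if b then y else x := by
  cases b <;> rfl

-- a guarded fold over L is the fold over the valid images of L (glue of three library lemmas)
theorem pv_foldl_if_map_filter {α β γ : Type} (L : List α) (f : α → γ) (p : γ → Bool)
    (g : β → γ → β) (init : β) :
    L.foldl (fun acc x => if p (f x) then g acc (f x) else acc) init
      = ((L.map f).filter p).foldl g init := by
  rw [List.filter_map, List.foldl_map, PySem.List.foldl_if_eq_foldl_filter]
  rfl

-- Nat-indexed twin of pvMaskSubset (proof device)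
def pvNatSub (els : List String) (mk : Nat) : List String :=
  (List.range els.length).foldl (fun s j => if mk.testBit j then s ++ [els.getD j ""] else s) []

-- the masks 1 .. 2^n - 1 in A's order, built by doubling (proof device)
def pvMaskL : Nat → List Nat
  | 0 => []
  | n + 1 => pvMaskL n ++ 2 ^ n :: (pvMaskL n).map (fun mk => 2 ^ n + mk)

theorem pvMaskL_bounds (n : Nat) : ∀ mk ∈ pvMaskL n, 1 ≤ mk ∧ mk < 2 ^ n := by
  induction n with
  | zero => simp [pvMaskL]
  | succ n ih =>
    have h2 : 0 < 2 ^ n := Nat.two_pow_pos n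
    have hs : 2 ^ (n + 1) = 2 ^ n + 2 ^ n := by rw [pow_succ]; omega
    intro mk hmk
    simp only [pvMaskL, List.mem_append, List.mem_cons, List.mem_map] at hmk
    rcases hmk with h | h | ⟨x, hx, rfl⟩
    · have := ih mk h; omega
    · omega
    · have := ih x hx; omega

theorem pvMaskL_eq_range (n : Nat) : pvMaskL n = (List.range (2 ^ n - 1)).map (· + 1) := by
  induction n with
  | zero => simp [pvMaskL]
  | succ n ih =>
    have h2 : 0 < 2 ^ n := Nat.two_pow_pos n
    have hsplit : 2 ^ (n+1) - 1 = (2 ^ n - 1) + 2 ^ n := by rw [pow_succ]; omega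
    have h2n : 2 ^ n = (2 ^ n - 1) + 1 := by omega
    rw [pvMaskL, ih, hsplit, List.range_add, List.map_append]
    congr 1
    rw [h2n, List.range_succ_eq_map]
    simp only [List.map_cons, List.map_map, Nat.add_sub_cancel, Nat.add_zero]
    congr 1
    apply List.map_congr_left
    intro x _
    simp only [Function.comp]
    omega

theorem pvRange_masks (n : Nat) :
    PySem.List.pyRange 1 ((1 : Int) <<< n) 1 = (pvMaskL n).map (Nat.cast : Nat → Int) := by
  have h2 : 0 < 2 ^ n := Nat.two_pow_pos n
  have hsh : (1 : Int) <<< n = ((2 ^ n : Nat) : Int) := by simp [Int.shiftLeft_eq]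
  have hc : ((2 ^ n : Nat) : Int) - 1 = ((2 ^ n - 1 : Nat) : Int) := by
    rw [Nat.cast_sub h2, Nat.cast_one]
  rw [hsh, PySem.List.pyRange_one, hc, Int.toNat_natCast, pvMaskL_eq_range]
  simp only [List.map_map]
  apply List.map_congr_left
  intro x _
  simp only [Function.comp]
  push_cast
  omega

theorem pvMaskSubset_natCast (els : List String) (mk : Nat) :
    pvMaskSubset els (mk : Int) = pvNatSub els mk := by
  unfold pvMaskSubset pvNatSub
  rw [PySem.List.pyRange_one]
  simp only [Int.sub_zero, Int.toNat_natCast, zero_add]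
  rw [List.foldl_map]
  apply PySem.List.foldl_congr_mem
  intro acc j hj
  simp only [List.mem_range] at hj
  have hband : PySem.Int.band (mk : Int) ((1 : Int) <<< (((j:Int)).toNat : Int))
      = ((mk &&& 2 ^ j : Nat) : Int) := by
    rw [show (1:Int) = ((1:Nat):Int) from rfl, Int.toNat_natCast, Int.shiftLeft_natCast,
       Nat.one_shiftLeft, PySem.Int.band_natCast]
  rw [hband, PySem.List.pyGetD_natCast, Nat.and_two_pow]
  cases h : mk.testBit j <;> simp

theorem pvNatSub_zero (els : List String) : pvNatSub els 0 = [] := by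
  simp [pvNatSub]

theorem pvNatSub_low (els : List String) (e : String) (mk : Nat) (h : mk < 2 ^ els.length) :
    pvNatSub (els ++ [e]) mk = pvNatSub els mk := by
  unfold pvNatSub
  rw [List.length_append, List.length_cons, List.length_nil, List.range_succ, List.foldl_append]
  have hbit : mk.testBit els.length = false := Nat.testBit_lt_two_pow h
  simp only [List.foldl_cons, List.foldl_nil, hbit, Bool.false_eq_true]
  apply PySem.List.foldl_congr_mem
  intro acc j hj
  simp only [List.mem_range] at hj
  rw [List.getD_append _ _ _ _ hj]

theorem pvNatSub_high (els : List String) (e : String) (mk : Nat) (h : mk < 2 ^ els.length) :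
    pvNatSub (els ++ [e]) (2 ^ els.length + mk) = pvNatSub els mk ++ [e] := by
  unfold pvNatSub
  rw [List.length_append, List.length_cons, List.length_nil, List.range_succ, List.foldl_append]
  have hbit : (2 ^ els.length + mk).testBit els.length = true := by
    rw [Nat.testBit_two_pow_add_eq, Nat.testBit_lt_two_pow h]; rfl
  have hgd : (els ++ [e]).getD els.length "" = e := by
    rw [List.getD, List.getElem?_append_right (le_refl _)]
    simp
  simp only [List.foldl_cons, List.foldl_nil, hbit, if_pos, hgd]
  congr 1
  apply PySem.List.foldl_congr_mem
  intro acc j hj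
  simp only [List.mem_range] at hj
  rw [Nat.testBit_two_pow_add_gt hj, List.getD_append _ _ _ _ hj]

theorem pvNatSub_mem_aux (els : List String) (mk : Nat) (L : List Nat) :
    ∀ acc, (∀ x ∈ acc, x ∈ els) → (∀ j ∈ L, j < els.length) →
      ∀ b ∈ L.foldl (fun s j => if mk.testBit j then s ++ [els.getD j ""] else s) acc, b ∈ els := by
  induction L with
  | nil => intro acc hacc _ b hb; exact hacc b hb
  | cons j L ih =>
    intro acc hacc hL b hb
    simp only [List.foldl_cons] at hb
    refine ih _ ?_ (fun x hx => hL x (List.mem_cons_of_mem _ hx)) b hb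
    intro x hx
    by_cases hbit : mk.testBit j
    · simp only [hbit, if_pos, List.mem_append, List.mem_singleton] at hx
      rcases hx with hx | rfl
      · exact hacc x hx
      · have hj : j < els.length := hL j (List.mem_cons_self)
        rw [List.getD_eq_getElem _ _ hj]
        exact List.getElem_mem _
    · simp only [hbit, Bool.false_eq_true] at hx
      exact hacc x hx

theorem pvNatSub_mem (els : List String) (mk : Nat) :
    ∀ b ∈ pvNatSub els mk, b ∈ els := by
  apply pvNatSub_mem_aux
  · intro x hx; cases hx
  · intro j hj; exact List.mem_range.mp hj

-- index-free reading of check_internal_relations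
theorem pvCheckInternal_iff (m : PySem.Dict String (PySem.Dict String String)) (S : List String) :
    pvCheckInternal m S = true ↔
      ∀ i : Nat, i < S.length → ∀ j : Nat, j < S.length →
        i ≠ j → pvRelGet m (S.getD i "") (S.getD j "") = "#L" := by
  unfold pvCheckInternal
  simp only [List.all_eq_true, PySem.List.mem_pyRange_one]
  constructor
  · intro h i hi j hj hne
    have := h (i : Int) ⟨by omega, by omega⟩ (j : Int) ⟨by omega, by omega⟩
    simp only [PySem.List.pyGetD_natCast, beq_iff_eq, Bool.or_eq_true, Nat.cast_inj] at this
    tauto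
  · intro h i ⟨hi0, hi⟩ j ⟨hj0, hj⟩
    by_cases hij : i = j
    · simp [hij]
    · have hieq : i = ((i.toNat : Nat) : Int) := by omega
      have hjeq : j = ((j.toNat : Nat) : Int) := by omega
      rw [hieq, hjeq, PySem.List.pyGetD_natCast, PySem.List.pyGetD_natCast]
      have := h i.toNat (by omega) j.toNat (by omega) (by omega)
      simp only [List.getD_eq_getElem?_getD] at this
      simp [this]

theorem pvCheckInternal_singleton (m : PySem.Dict String (PySem.Dict String String)) (e : String) :
    pvCheckInternal m [e] = true := by
  rw [pvCheckInternal_iff]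
  intro i hi j hj hne
  simp only [List.length_singleton] at hi hj
  omega

theorem pvCheckInternal_snoc (m : PySem.Dict String (PySem.Dict String String))
    (S : List String) (e : String) :
    pvCheckInternal m (S ++ [e]) = (pvCheckInternal m S && pvCompat m S e) := by
  rw [Bool.eq_iff_iff, Bool.and_eq_true, pvCheckInternal_iff, pvCheckInternal_iff]
  unfold pvCompat
  simp only [List.all_eq_true, Bool.and_eq_true, beq_iff_eq]
  constructor
  · intro h
    refine ⟨fun i hi j hj hne => ?_, fun a ha => ?_⟩
    · have := h i (by simp; omega) j (by simp; omega) hne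
      rwa [List.getD_append _ _ _ _ hi, List.getD_append _ _ _ _ hj] at this
    · obtain ⟨k, hk, rfl⟩ := List.mem_iff_getElem.mp ha
      have hlen : (S ++ [e]).length = S.length + 1 := by simp
      have hgde : (S ++ [e]).getD S.length "" = e := by
        rw [List.getD, List.getElem?_append_right (le_refl _)]; simp
      have hgdk : (S ++ [e]).getD k "" = S[k] := by
        rw [List.getD_append _ _ _ _ hk, List.getD_eq_getElem _ _ hk]
      constructor
      · have := h k (by omega) S.length (by omega) (by omega)
        rwa [hgdk, hgde] at this
      · have := h S.length (by omega) k (by omega) (by omega)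
        rwa [hgdk, hgde] at this
  · rintro ⟨hS, hcomp⟩ i hi j hj hne
    simp only [List.length_append, List.length_singleton] at hi hj
    have hgde : (S ++ [e]).getD S.length "" = e := by
      rw [List.getD, List.getElem?_append_right (le_refl _)]; simp
    rcases Nat.lt_or_ge i S.length with hiS | hiS
    · rcases Nat.lt_or_ge j S.length with hjS | hjS
      · rw [List.getD_append _ _ _ _ hiS, List.getD_append _ _ _ _ hjS]
        exact hS i hiS j hjS hne
      · have hj' : j = S.length := by omega
        subst hj'
        rw [List.getD_append _ _ _ _ hiS, hgde]
        have : S.getD i "" ∈ S := by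
          rw [List.getD_eq_getElem _ _ hiS]; exact List.getElem_mem _
        exact (hcomp _ this).1
    · have hi' : i = S.length := by omega
      subst hi'
      have hjS : j < S.length := by omega
      rw [List.getD_append _ _ _ _ hjS, hgde]
      have : S.getD j "" ∈ S := by
        rw [List.getD_eq_getElem _ _ hjS]; exact List.getElem_mem _
      exact (hcomp _ this).2

-- B's pruned doubling builds exactly the internally-valid subsets, in A's mask order
theorem pvValids_eq (m : PySem.Dict String (PySem.Dict String String)) (els : List String) :
    pvValids m els = ((pvMaskL els.length).map (pvNatSub els)).filter (pvCheckInternal m) := by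
  induction els using List.reverseRecOn with
  | nil => simp [pvValids, pvMaskL]
  | append_singleton els e ih =>
    have h2 : 0 < 2 ^ els.length := Nat.two_pow_pos els.length
    have hL : pvValids m (els ++ [e])
        = pvValids m els
          ++ ([[e]] ++ ((pvValids m els).filter (fun S => pvCompat m S e)).map (· ++ [e])) := by
      unfold pvValids
      rw [List.foldl_append, List.foldl_cons, List.foldl_nil,
          PySem.List.foldl_append_if]
    rw [hL, List.length_append, List.length_singleton, pvMaskL]
    rw [List.map_append, List.filter_append, List.map_cons, List.filter_cons]
    have hmap1 : (pvMaskL els.length).map (pvNatSub (els ++ [e]))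
        = (pvMaskL els.length).map (pvNatSub els) := by
      apply List.map_congr_left
      intro mk hmk
      exact pvNatSub_low els e mk (pvMaskL_bounds els.length mk hmk).2
    have hsing : pvNatSub (els ++ [e]) (2 ^ els.length) = [e] := by
      have := pvNatSub_high els e 0 h2
      rw [Nat.add_zero, pvNatSub_zero] at this
      simpa using this
    have hmap2 : ((pvMaskL els.length).map (fun mk => 2 ^ els.length + mk)).map (pvNatSub (els ++ [e]))
        = (pvMaskL els.length).map (fun mk => pvNatSub els mk ++ [e]) := by
      rw [List.map_map]
      apply List.map_congr_left
      intro mk hmk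
      simp only [Function.comp]
      exact pvNatSub_high els e mk (pvMaskL_bounds els.length mk hmk).2
    rw [hmap1, hsing, hmap2, ih, pvCheckInternal_singleton]
    simp only [ite_true]
    congr 2
    have h3 : List.filter (pvCheckInternal m) ((pvMaskL els.length).map (fun mk => pvNatSub els mk ++ [e]))
        = List.map (fun x => x ++ [e]) (List.filter (fun S => pvCompat m S e)
            (List.filter (pvCheckInternal m) ((pvMaskL els.length).map (pvNatSub els)))) := by
      rw [List.filter_map, List.filter_filter, List.filter_map, List.map_map]
      congr 1
      apply List.filter_congr
      intro mk _
      simp only [Function.comp]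
      rw [pvCheckInternal_snoc, Bool.and_comm]
    rw [h3]
    rfl

theorem pvValids_eq_masks (m : PySem.Dict String (PySem.Dict String String)) (els : List String) :
    pvValids m els
      = ((PySem.List.pyRange 1 ((1 : Int) <<< els.length) 1).map (pvMaskSubset els)).filter
          (pvCheckInternal m) := by
  rw [pvValids_eq, pvRange_masks]
  congr 1
  rw [List.map_map]
  apply List.map_congr_left
  intro mk _
  simp only [Function.comp]
  exact (pvMaskSubset_natCast els mk).symm

theorem pvValids_mem (m : PySem.Dict String (PySem.Dict String String)) (els : List String) :
    ∀ S ∈ pvValids m els, ∀ b ∈ S, b ∈ els := by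
  rw [pvValids_eq]
  intro S hS
  obtain ⟨mk, _, rfl⟩ := List.mem_map.mp (List.mem_of_mem_filter hS)
  exact pvNatSub_mem els mk

-- B's target-list membership test agrees with A's per-pair matrix scan
theorem pvTset_cond (m : PySem.Dict String (PySem.Dict String String)) (els sa sb : List String)
    (hsb : ∀ b ∈ sb, b ∈ els) :
    (sb.all (fun b =>
        (els.filter (fun b' => sa.all (fun a => pvRelGet m a b' == "→L"))).contains b))
      = pvCheckSet m sa sb := by
  unfold pvCheckSet
  rw [Bool.eq_iff_iff]
  simp only [List.all_eq_true, List.contains_iff_mem, List.mem_filter, beq_iff_eq]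
  constructor
  · intro h a ha b hb
    exact ((h b hb).2) a ha
  · intro h b hb
    exact ⟨hsb b hb, fun a ha => h a ha b hb⟩

-- ===== VERDICT (by name: the statement is the Claim_ definition above) =====
theorem compute_XL_corrected_spec : Claim_equal_compute_XL_corrected := by
  intro log _
  unfold Spec_compute_XL_corrected compute_XL_corrected compute_XL_corrected_alt
  simp only [pv_if_bnot]
  rw [pv_foldl_if_map_filter
        (PySem.List.pyRange 1 ((1 : Int) <<< (pvElements log).length) 1)
        (pvMaskSubset (pvElements log))
        (pvCheckInternal (generate_relation_matrix log))
        (fun XL sa =>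
          (PySem.List.pyRange 1 ((1 : Int) <<< (pvElements log).length) 1).foldl
            (fun XL k =>
              if pvCheckInternal (generate_relation_matrix log) (pvMaskSubset (pvElements log) k) then
                (if pvCheckSet (generate_relation_matrix log) sa (pvMaskSubset (pvElements log) k) then
                  PySem.Set.add XL
                    (PySem.Set.ofList sa, PySem.Set.ofList (pvMaskSubset (pvElements log) k))
                else XL)
              else XL) XL)]
  rw [← pvValids_eq_masks]
  apply PySem.List.foldl_congr_mem
  intro XL sa _
  rw [pv_foldl_if_map_filter
        (PySem.List.pyRange 1 ((1 : Int) <<< (pvElements log).length) 1)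
        (pvMaskSubset (pvElements log))
        (pvCheckInternal (generate_relation_matrix log))
        (fun XL sb =>
          if pvCheckSet (generate_relation_matrix log) sa sb then
            PySem.Set.add XL (PySem.Set.ofList sa, PySem.Set.ofList sb)
          else XL)]
  rw [← pvValids_eq_masks]
  apply PySem.List.foldl_congr_mem
  intro XL' sb hsb
  rw [pvTset_cond (generate_relation_matrix log) (pvElements log) sa sb
        (pvValids_mem _ _ sb hsb)]
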